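-- pv_equiv track=rewrite | github.com/HudsonPryde/leetcode-daily | 2024-06/replaceWords.py | hash_solution
-- ===== SOURCE A (Python) =====
-- from typing import List
--
-- def hash_solution(dictionary: List[str], sentence: str) -> str:
--   words = sentence.split(' ')
--   dictionary.sort(key=lambda s: len(s))
--   d = {}
--   for root in dictionary:
--     l: List[str] = d.get(root[0], [])
--     l.append(root)
--     d[root[0]] = l
--   for i,w in enumerate(words):
--     if w[0] in d:
--       for r in d[w[0]]:
--         if w[:len(r)] == r:
--           words[i] = r
--           break
--   return " ".join(words)
-- ===== SOURCE B (Python) =====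
-- def hash_solution(dictionary, sentence):
--     # Note: A sorts `dictionary` in place; B does not mutate it (the return value is identical).
--     by_first = {}
--     for r in dictionary:
--         by_first.setdefault(r[0], set()).add(r)
--     out = []
--     for w in sentence.split(' '):
--         rep = w
--         roots = by_first.get(w[0], set())
--         for k in range(1, len(w) + 1):
--             p = w[:k]
--             if p in roots:
--                 rep = p
--                 break
--         out.append(rep)
--     return ' '.join(out)
-- ===== Notes on version B (the rewrite author's own statement) =====
-- stated objective: alternative
-- what changed: B drops A's length-sort and per-word linear scan over the first-letter bucket LIST of roots and instead buckets the roots into hash SETS by first letter and, for each word, tries the word's own prefixes of increasing length with set lookups, the first hit being the shortest root; it trades the scan over roots for a scan over the word's prefixes.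
import Mathlib
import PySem

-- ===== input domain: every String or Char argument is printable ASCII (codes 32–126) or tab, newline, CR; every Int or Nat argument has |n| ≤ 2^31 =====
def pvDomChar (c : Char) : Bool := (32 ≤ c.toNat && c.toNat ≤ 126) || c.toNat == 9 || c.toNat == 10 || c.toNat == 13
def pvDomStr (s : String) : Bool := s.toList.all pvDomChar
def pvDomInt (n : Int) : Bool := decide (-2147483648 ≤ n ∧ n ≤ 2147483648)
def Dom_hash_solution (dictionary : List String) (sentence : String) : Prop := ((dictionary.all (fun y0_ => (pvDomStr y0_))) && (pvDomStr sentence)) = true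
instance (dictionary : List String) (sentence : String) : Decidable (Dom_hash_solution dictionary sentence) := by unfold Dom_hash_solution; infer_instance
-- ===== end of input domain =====

-- B replaces A's length-sort + per-word linear scan over the bucket's root LIST by hash-set
-- buckets and a scan over the word's own prefixes of increasing length (objective: alternative
-- algorithm, same cost). Note: Python A sorts `dictionary` in place; B does not mutate it — the
-- equivalence proved here is about the return value.

-- ===== PORT A =====
-- inner `for r in d[w[0]]: if w[:len(r)] == r: … break`
def aScan (w : String) : List String → Option String
  | [] => none
  | r :: rs =>
    if PySem.Str.slice w none (some (PySem.Str.len r)) = r then some r else aScan w rs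

def hash_solution (dictionary : List String) (sentence : String) : String :=
  -- sentence.split(' '): separator is nonempty, so split? is always `some`
  let words := (PySem.Str.split? sentence " ").getD []
  -- dictionary.sort(key=lambda s: len(s))  (stable)
  let dict := PySem.List.sorted dictionary (fun s => PySem.Str.len s) false
  -- group roots by first character; root[0] raises IndexError on an empty root (excluded by Pre_,
  -- the `.getD ' '` default is never reached there)
  let d := dict.foldl (fun d root =>
    d.insert ((PySem.Str.pyGet? root 0).getD ' ')
      (d.getD ((PySem.Str.pyGet? root 0).getD ' ') [] ++ [root])) PySem.Dict.empty
  -- for i,w in enumerate(words): …  (w[0] raises IndexError on an empty word, excluded by Pre_)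
  let words := (PySem.List.enumerate words).foldl (fun ws iw =>
    if d.contains ((PySem.Str.pyGet? iw.2 0).getD ' ') then
      match aScan iw.2 (d.getD ((PySem.Str.pyGet? iw.2 0).getD ' ') []) with
      | some r => ws.set iw.1.toNat r
      | none => ws
    else ws) words
  PySem.Str.join " " words

-- ===== PORT B =====
-- `for k in range(1, len(w)+1): p = w[:k]; if p in roots: rep = p; break`
def bScan (roots : PySem.Set String) (w : String) : List Int → String
  | [] => w
  | k :: ks =>
    let p := PySem.Str.slice w none (some k)
    if roots.contains p then p else bScan roots w ks

def hash_solution_alt (dictionary : List String) (sentence : String) : String :=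
  -- by_first.setdefault(r[0], set()).add(r): bucket the roots into sets keyed by first character
  -- (r[0] raises IndexError on an empty root, exactly as A does; excluded by Pre_)
  let byFirst := dictionary.foldl (fun d r =>
    d.insert ((PySem.Str.pyGet? r 0).getD ' ')
      (PySem.Set.add (d.getD ((PySem.Str.pyGet? r 0).getD ' ') (PySem.Set.ofList [])) r))
    PySem.Dict.empty
  -- for each word: roots = by_first.get(w[0], set()), then the prefix scan
  -- (w[0] raises IndexError on an empty word, exactly as A does; excluded by Pre_)
  let out := ((PySem.Str.split? sentence " ").getD []).foldl
    (fun acc w => acc ++ [bScan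
      (byFirst.getD ((PySem.Str.pyGet? w 0).getD ' ') (PySem.Set.ofList []))
      w (PySem.List.pyRange 1 (PySem.Str.len w + 1) 1)]) []
  PySem.Str.join " " out

-- ===== PRECONDITION & SPEC =====
-- Pre_ excludes exactly the inputs where A raises IndexError: an empty root (root[0]) or an
-- empty word of the split, i.e. a sentence that is empty or has leading/trailing/adjacent spaces (w[0]).
def Pre_hash_solution (dictionary : List String) (sentence : String) : Prop :=
  (∀ r ∈ dictionary, r ≠ "") ∧ (∀ w ∈ (PySem.Str.split? sentence " ").getD [], w ≠ "")

instance (dictionary : List String) (sentence : String) : Decidable (Pre_hash_solution dictionary sentence) := by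
  unfold Pre_hash_solution; infer_instance

def pvWitness_hash_solution : List String × String := (["cat", "bat", "rat"], "the cattle was rattled by the battery")

def Spec_hash_solution (dictionary : List String) (sentence : String) (out : String) : Prop := out = hash_solution_alt dictionary sentence
instance (dictionary : List String) (sentence : String) (out : String) : Decidable (Spec_hash_solution dictionary sentence out) := by unfold Spec_hash_solution; infer_instance

-- ===== CLAIM (what is proved, stated in full; the proofs are below) =====
def Claim_equal_hash_solution : Prop := ∀ (dictionary : List String) (sentence : String), Dom_hash_solution dictionary sentence → Pre_hash_solution dictionary sentence → Spec_hash_solution dictionary sentence (hash_solution dictionary sentence)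

-- ===== LEMMAS AND PROOFS =====

-- the first-word-character key, as the ports write it
theorem hKey_eq (r : String) : (PySem.Str.pyGet? r 0).getD ' ' = r.toList.headD ' ' := by
  rw [show (0 : Int) = ((0 : Nat) : Int) from rfl, PySem.Str.pyGet?_natCast]
  cases r.toList <;> simp

theorem toList_slice_take (w : String) (k : Int) (hk : 0 ≤ k) :
    (PySem.Str.slice w none (some k)).toList = w.toList.take k.toNat := by
  simp [PySem.Str.toList_slice, PySem.Chars.slice_eq_listSlice, PySem.List.slice_to _ hk]

theorem match_iff (w r : String) :
    PySem.Str.slice w none (some (PySem.Str.len r)) = r ↔ r.toList <+: w.toList := by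
  have hk : (0 : Int) ≤ PySem.Str.len r := by
    rw [PySem.Str.len_eq]; exact Int.natCast_nonneg _
  rw [String.ext_iff, toList_slice_take w _ hk, PySem.Str.len_eq, Int.toNat_natCast]
  constructor
  · intro h; rw [← h]; exact List.take_prefix _ _
  · intro h; exact (List.prefix_iff_eq_take.mp h).symm

theorem headD_of_prefix (r cs : List Char) (h : r <+: cs) (hne : r ≠ []) :
    cs.headD ' ' = r.headD ' ' := by
  obtain ⟨t, rfl⟩ := h
  cases r with
  | nil => exact absurd rfl hne
  | cons a l => rfl

theorem aScan_eq (w : String) (l : List String) :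
    aScan w l = l.find? (fun r => PySem.Str.slice w none (some (PySem.Str.len r)) == r) := by
  induction l with
  | nil => rfl
  | cons r rs ih =>
    rw [aScan, ih]
    simp only [List.find?_cons]
    by_cases h : PySem.Str.slice w none (some (PySem.Str.len r)) = r
    · rw [if_pos h, beq_iff_eq.mpr h]
    · rw [if_neg h, beq_eq_false_iff_ne.mpr h]

theorem bScan_eq (roots : PySem.Set String) (w : String) (ks : List Int) :
    bScan roots w ks =
      match ks.find? (fun k => roots.contains (PySem.Str.slice w none (some k))) with
      | some k => PySem.Str.slice w none (some k)
      | none => w := by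
  induction ks with
  | nil => rfl
  | cons k ks ih =>
    rw [bScan]
    simp only [List.find?_cons]
    cases h : roots.contains (PySem.Str.slice w none (some k))
    · rw [if_neg (by decide)]
      exact ih
    · rw [if_pos rfl]


theorem find?_pyRange_none (Q : Int → Bool) (a b : Int)
    (h : ∀ k, a ≤ k → k < b → Q k = false) :
    (PySem.List.pyRange a b 1).find? Q = none := by
  rw [List.find?_eq_none]
  intro x hx
  have hm := PySem.List.mem_pyRange_one.mp hx
  simp [h x hm.1 hm.2]

theorem find?_pyRange_some (Q : Int → Bool) (a b k : Int) (h1 : a ≤ k) (h2 : k < b)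
    (hk : Q k = true) (hmin : ∀ j, a ≤ j → j < k → Q j = false) :
    (PySem.List.pyRange a b 1).find? Q = some k := by
  rw [PySem.List.pyRange_one_append a k b h1 (le_of_lt h2), List.find?_append,
    find?_pyRange_none Q a k hmin, PySem.List.pyRange_one_cons h2]
  simp [hk]

-- the grouping loop of A: d[c] collects, in order, the roots whose first character is c
theorem getD_build (l : List String) (d : PySem.Dict Char (List String)) (c : Char) :
    (l.foldl (fun d root =>
        d.insert ((PySem.Str.pyGet? root 0).getD ' ')
          (d.getD ((PySem.Str.pyGet? root 0).getD ' ') [] ++ [root])) d).getD c []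
      = d.getD c [] ++ l.filter (fun r => (PySem.Str.pyGet? r 0).getD ' ' == c) := by
  induction l generalizing d with
  | nil => simp
  | cons r l ih =>
    simp only [List.foldl_cons, List.filter_cons]
    rw [ih, PySem.Dict.getD_insert]
    by_cases hc : c = (PySem.Str.pyGet? r 0).getD ' '
    · rw [if_pos hc, if_pos (beq_iff_eq.mpr hc.symm), hc]
      simp
    · rw [if_neg hc, if_neg (by simp only [beq_iff_eq]; exact fun h => hc h.symm)]

-- the word loop of A: an index-wise update loop over enumerate is a map
theorem loopA (g : String → String) (F : List String → Int × String → List String)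
    (hF : ∀ (pre : List String) (x : String) (rest : List String),
      F (pre ++ x :: rest) ((pre.length : Int), x) = pre ++ g x :: rest) :
    ∀ (xs pre : List String),
      (PySem.List.enumerate xs (pre.length : Int)).foldl F (pre ++ xs) = pre ++ xs.map g := by
  intro xs
  induction xs with
  | nil => intro pre; simp [PySem.List.enumerate]
  | cons x xs ih =>
    intro pre
    rw [PySem.List.enumerate_cons, List.foldl_cons, hF pre x xs]
    have h1 : pre ++ g x :: xs = (pre ++ [g x]) ++ xs := by simp
    have h2 : (pre.length : Int) + 1 = (((pre ++ [g x]).length : Nat) : Int) := by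
      simp [List.length_append]
    rw [h1, h2, ih (pre ++ [g x])]
    simp

-- B's bucket build: membership in the first-character bucket of the folded dict
theorem buckets_contains (l : List String) (d : PySem.Dict Char (PySem.Set String))
    (c : Char) (p : String) :
    (((l.foldl (fun d r =>
        d.insert ((PySem.Str.pyGet? r 0).getD ' ')
          (PySem.Set.add (d.getD ((PySem.Str.pyGet? r 0).getD ' ') (PySem.Set.ofList [])) r))
        d).getD c (PySem.Set.ofList [])).contains p = true)
    ↔ ((d.getD c (PySem.Set.ofList [])).contains p = true
        ∨ (p ∈ l ∧ (PySem.Str.pyGet? p 0).getD ' ' = c)) := by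
  induction l generalizing d with
  | nil => simp
  | cons r l ih =>
    rw [List.foldl_cons, ih, PySem.Dict.getD_insert]
    by_cases hc : c = (PySem.Str.pyGet? r 0).getD ' '
    · rw [if_pos hc, ← hc, PySem.Set.contains_iff, PySem.Set.mem_add]
      constructor
      · rintro (h | h)
        · rcases h with h | h
          · exact Or.inl ((PySem.Set.contains_iff _ _).mpr h)
          · exact Or.inr ⟨h ▸ List.mem_cons_self, h ▸ hc.symm⟩
        · exact Or.inr ⟨List.mem_cons_of_mem _ h.1, h.2⟩
      · rintro (h | ⟨hm, hk⟩)
        · exact Or.inl (Or.inl ((PySem.Set.contains_iff _ _).mp h))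
        · rcases List.mem_cons.mp hm with rfl | hm'
          · exact Or.inl (Or.inr rfl)
          · exact Or.inr ⟨hm', hk⟩
    · rw [if_neg hc]
      constructor
      · rintro (h | h)
        · exact Or.inl h
        · exact Or.inr ⟨List.mem_cons_of_mem _ h.1, h.2⟩
      · rintro (h | ⟨hm, hk⟩)
        · exact Or.inl h
        · rcases List.mem_cons.mp hm with rfl | hm'
          · exact absurd hk.symm hc
          · exact Or.inr ⟨hm', hk⟩

-- the crux: first prefix-root in the length-sorted bucket = shortest matching prefix of the word
theorem word_eq (D L : List String) (hD : ∀ r ∈ D, r ≠ "")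
    (hperm : L.Perm D)
    (hpw : L.Pairwise (fun a b => PySem.Str.len a ≤ PySem.Str.len b))
    (w : String) (S : PySem.Set String)
    (hS : ∀ p : String, S.contains p = true ↔
      (p ∈ D ∧ (PySem.Str.pyGet? p 0).getD ' ' = (PySem.Str.pyGet? w 0).getD ' ')) :
    (match aScan w (L.filter (fun r =>
        (PySem.Str.pyGet? r 0).getD ' ' == (PySem.Str.pyGet? w 0).getD ' ')) with
     | some r => r
     | none => w)
      = bScan S w (PySem.List.pyRange 1 (PySem.Str.len w + 1) 1) := by
  have hback : ∀ r : String, r ∈ D → r.toList <+: w.toList → r.toList ≠ [] →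
      (r ∈ L.filter (fun r =>
        (PySem.Str.pyGet? r 0).getD ' ' == (PySem.Str.pyGet? w 0).getD ' ')
       ∧ PySem.Str.slice w none (some (PySem.Str.len r)) = r) := by
    intro r hrD hpre hrl
    have hkey : ((PySem.Str.pyGet? r 0).getD ' ' == (PySem.Str.pyGet? w 0).getD ' ') = true := by
      rw [hKey_eq, hKey_eq, beq_iff_eq]
      exact (headD_of_prefix r.toList w.toList hpre hrl).symm
    exact ⟨List.mem_filter.mpr ⟨hperm.mem_iff.mpr hrD, hkey⟩, (match_iff w r).mpr hpre⟩
  rw [aScan_eq, bScan_eq]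
  cases hfind : (L.filter (fun r =>
      (PySem.Str.pyGet? r 0).getD ' ' == (PySem.Str.pyGet? w 0).getD ' ')).find?
      (fun r => PySem.Str.slice w none (some (PySem.Str.len r)) == r) with
  | none =>
    have hnone : (PySem.List.pyRange 1 (PySem.Str.len w + 1) 1).find?
        (fun k => S.contains (PySem.Str.slice w none (some k))) = none := by
      apply find?_pyRange_none
      intro k h1 _h2
      by_contra hq
      rw [Bool.not_eq_false] at hq
      have hmem : PySem.Str.slice w none (some k) ∈ D := ((hS _).mp hq).1
      have hk0 : (0 : Int) ≤ k := by omega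
      have htl : (PySem.Str.slice w none (some k)).toList = w.toList.take k.toNat :=
        toList_slice_take w k hk0
      have hpre : (PySem.Str.slice w none (some k)).toList <+: w.toList := by
        rw [htl]; exact List.take_prefix _ _
      have hne' : (PySem.Str.slice w none (some k)).toList ≠ [] := by
        intro h
        apply hD _ hmem
        rw [String.ext_iff]
        simpa using h
      obtain ⟨hmemf, hPr⟩ := hback _ hmem hpre hne'
      exact (List.find?_eq_none.mp hfind _ hmemf) (beq_iff_eq.mpr hPr)
    rw [hnone]
  | some r₀ =>
    rw [List.find?_eq_some_iff_append] at hfind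
    obtain ⟨hP0, as, bs, hsplit, has⟩ := hfind
    have hr0mem : r₀ ∈ L.filter (fun r =>
        (PySem.Str.pyGet? r 0).getD ' ' == (PySem.Str.pyGet? w 0).getD ' ') := by
      rw [hsplit]
      exact List.mem_append.mpr (Or.inr List.mem_cons_self)
    have hr0D : r₀ ∈ D := hperm.mem_iff.mp (List.mem_filter.mp hr0mem).1
    have hr0eq : PySem.Str.slice w none (some (PySem.Str.len r₀)) = r₀ := beq_iff_eq.mp hP0
    have hpre0 : r₀.toList <+: w.toList := (match_iff w r₀).mp hr0eq
    have hr0ne : r₀.toList ≠ [] := by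
      intro h
      apply hD r₀ hr0D
      rw [String.ext_iff]
      simpa using h
    have hm1 : 0 < r₀.toList.length := by
      cases h : r₀.toList with
      | nil => exact absurd h hr0ne
      | cons a t => simp
    have hmlen : r₀.toList.length ≤ w.toList.length := hpre0.length_le
    have htake : w.toList.take r₀.toList.length = r₀.toList :=
      (List.prefix_iff_eq_take.mp hpre0).symm
    have hsl : PySem.Str.slice w none (some ((r₀.toList.length : Nat) : Int)) = r₀ := by
      rw [String.ext_iff, toList_slice_take w _ (Int.natCast_nonneg _), Int.toNat_natCast]
      exact htake
    have hkey0 : (PySem.Str.pyGet? r₀ 0).getD ' ' = (PySem.Str.pyGet? w 0).getD ' ' :=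
      beq_iff_eq.mp (List.mem_filter.mp hr0mem).2
    have hQm : (S.contains
        (PySem.Str.slice w none (some ((r₀.toList.length : Nat) : Int)))) = true := by
      rw [hsl]
      exact (hS r₀).mpr ⟨hr0D, hkey0⟩
    have hmin : ∀ j : Int, 1 ≤ j → j < (r₀.toList.length : Int) →
        (S.contains (PySem.Str.slice w none (some j))) = false := by
      intro j hj1 hjm
      by_contra hq
      rw [Bool.not_eq_false] at hq
      have hj0 : (0 : Int) ≤ j := by omega
      have hmemD : PySem.Str.slice w none (some j) ∈ D := ((hS _).mp hq).1
      have htl : (PySem.Str.slice w none (some j)).toList = w.toList.take j.toNat :=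
        toList_slice_take w j hj0
      have hpre : (PySem.Str.slice w none (some j)).toList <+: w.toList := by
        rw [htl]; exact List.take_prefix _ _
      have hne' : (PySem.Str.slice w none (some j)).toList ≠ [] := by
        intro h
        apply hD _ hmemD
        rw [String.ext_iff]
        simpa using h
      obtain ⟨hmemf, hPr⟩ := hback _ hmemD hpre hne'
      have hlenj : (PySem.Str.slice w none (some j)).toList.length = j.toNat := by
        rw [htl, List.length_take]
        omega
      rw [hsplit] at hmemf
      rcases List.mem_append.mp hmemf with hin | hin
      · have hnp := has _ hin
        have hp : (PySem.Str.slice w none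
            (some (PySem.Str.len (PySem.Str.slice w none (some j))))
            == PySem.Str.slice w none (some j)) = true := beq_iff_eq.mpr hPr
        simp only [hp, Bool.not_true] at hnp
        exact Bool.false_ne_true hnp
      · rcases List.mem_cons.mp hin with heq | hin
        · have : (PySem.Str.slice w none (some j)).toList.length = r₀.toList.length := by
            rw [heq]
          omega
        · have hpair : (L.filter (fun r =>
              (PySem.Str.pyGet? r 0).getD ' ' == (PySem.Str.pyGet? w 0).getD ' ')).Pairwise
              (fun a b => PySem.Str.len a ≤ PySem.Str.len b) := hpw.filter _
          rw [hsplit] at hpair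
          have h2 := (List.pairwise_append.mp hpair).2.1
          have hle := (List.pairwise_cons.mp h2).1 _ hin
          rw [PySem.Str.len_eq, PySem.Str.len_eq, hlenj] at hle
          omega
    have hfr : (PySem.List.pyRange 1 (PySem.Str.len w + 1) 1).find?
        (fun k => S.contains (PySem.Str.slice w none (some k)))
        = some ((r₀.toList.length : Nat) : Int) :=
      find?_pyRange_some _ 1 (PySem.Str.len w + 1) _ (by omega)
        (by rw [PySem.Str.len_eq]; omega) hQm hmin
    rw [hfr]
    exact hsl.symm

-- ===== VERDICT (by name: the statement is the Claim_ definition above) =====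
theorem hash_solution_spec : Claim_equal_hash_solution := by
  intro dictionary sentence _hdom hpre
  obtain ⟨hD, _hW⟩ := hpre
  simp only [Spec_hash_solution, hash_solution, hash_solution_alt]
  rw [PySem.List.foldl_append_singleton_eq_map, List.nil_append]
  have hperm := PySem.List.sorted_perm dictionary (fun s => PySem.Str.len s) false
  have hpw := PySem.List.sorted_pairwise dictionary (fun s => PySem.Str.len s)
  set words := (PySem.Str.split? sentence " ").getD [] with hwords
  set L := PySem.List.sorted dictionary (fun s => PySem.Str.len s) false with hLdef
  set dct := L.foldl (fun d root =>
      d.insert ((PySem.Str.pyGet? root 0).getD ' ')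
        (d.getD ((PySem.Str.pyGet? root 0).getD ' ') [] ++ [root])) PySem.Dict.empty with hdct
  set byFirst := dictionary.foldl (fun d r =>
      d.insert ((PySem.Str.pyGet? r 0).getD ' ')
        (PySem.Set.add (d.getD ((PySem.Str.pyGet? r 0).getD ' ') (PySem.Set.ofList [])) r))
      PySem.Dict.empty with hbf
  have hS : ∀ (x : String) (p : String),
      ((byFirst.getD ((PySem.Str.pyGet? x 0).getD ' ') (PySem.Set.ofList [])).contains p = true)
      ↔ (p ∈ dictionary ∧ (PySem.Str.pyGet? p 0).getD ' ' = (PySem.Str.pyGet? x 0).getD ' ') := by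
    intro x p
    rw [hbf, buckets_contains]
    have hbase : ((PySem.Dict.empty : PySem.Dict Char (PySem.Set String)).getD
        ((PySem.Str.pyGet? x 0).getD ' ') (PySem.Set.ofList [])).contains p = false := rfl
    rw [hbase]
    simp
  have hgetD : ∀ c, dct.getD c [] = L.filter
      (fun r => (PySem.Str.pyGet? r 0).getD ' ' == c) := by
    intro c
    rw [hdct, getD_build]
    simp
  have hF : ∀ (pre : List String) (x : String) (rest : List String),
      (fun (ws : List String) (iw : Int × String) =>
        if dct.contains ((PySem.Str.pyGet? iw.2 0).getD ' ') then
          match aScan iw.2 (dct.getD ((PySem.Str.pyGet? iw.2 0).getD ' ') []) with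
          | some r => ws.set iw.1.toNat r
          | none => ws
        else ws) (pre ++ x :: rest) ((pre.length : Int), x)
      = pre ++ (if dct.contains ((PySem.Str.pyGet? x 0).getD ' ') then
          match aScan x (dct.getD ((PySem.Str.pyGet? x 0).getD ' ') []) with
          | some r => r
          | none => x
        else x) :: rest := by
    intro pre x rest
    dsimp only
    by_cases hc : dct.contains ((PySem.Str.pyGet? x 0).getD ' ')
    · rw [if_pos hc, if_pos hc]
      cases haS : aScan x (dct.getD ((PySem.Str.pyGet? x 0).getD ' ') []) with
      | none => rfl
      | some r =>
        show (pre ++ x :: rest).set (Int.toNat (pre.length : Int)) r = pre ++ r :: rest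
        rw [Int.toNat_natCast, List.set_append, if_neg (lt_irrefl _), Nat.sub_self]
        rfl
    · rw [if_neg hc, if_neg hc]
  have hmain := loopA
    (fun x => if dct.contains ((PySem.Str.pyGet? x 0).getD ' ') then
        match aScan x (dct.getD ((PySem.Str.pyGet? x 0).getD ' ') []) with
        | some r => r
        | none => x
      else x)
    (fun (ws : List String) (iw : Int × String) =>
      if dct.contains ((PySem.Str.pyGet? iw.2 0).getD ' ') then
        match aScan iw.2 (dct.getD ((PySem.Str.pyGet? iw.2 0).getD ' ') []) with
        | some r => ws.set iw.1.toNat r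
        | none => ws
      else ws) hF words []
  simp only [List.length_nil, Nat.cast_zero, List.nil_append] at hmain
  rw [hmain]
  apply congrArg
  apply List.map_congr_left
  intro x _hx
  by_cases hc : dct.contains ((PySem.Str.pyGet? x 0).getD ' ')
  · rw [if_pos hc, hgetD]
    exact word_eq dictionary L hD hperm hpw x _ (hS x)
  · rw [if_neg hc]
    rw [Bool.not_eq_true] at hc
    have h0 := PySem.Dict.getD_of_not_contains dct ([] : List String) hc
    rw [hgetD] at h0
    have hwe := word_eq dictionary L hD hperm hpw x _ (hS x)
    rw [h0] at hwe
    simpa [aScan] using hwe
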